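-- pv_equiv track=rewrite | github.com/rishabhranawat/challenge | leetcode/roman_numerals.py | getPreviousSmallest
-- ===== SOURCE A (Python) =====
-- def getPreviousSmallest(num):
--
--     ns = [1, 5, 10, 50, 100, 500, 1000]
--     if(num > ns[len(ns)-1]): return 1000, 100
--     margins = [0, 1, 1, 10, 10, 100, 100]
--     if(num in ns): return num, margins[ns.index(num)]
--     for i in range(0, len(ns)-1, 1):
--         next = ns[i+1]
--         next_marg = margins[i+1]
--         if(num > ns[i] and num < next):
--             if(next > num and (next-next_marg) <= num): return next, next_marg
--             else: return ns[i], margins[i]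
--     return None, None
-- ===== SOURCE B (Python) =====
-- def getPreviousSmallest(num):
--     ns = [1, 5, 10, 50, 100, 500, 1000]
--     margins = [0, 1, 1, 10, 10, 100, 100]
--     if num > 1000:
--         return 1000, 100
--     # binary search for the insertion point of num in ns (bisect_left by hand)
--     lo, hi = 0, len(ns)
--     while lo < hi:
--         mid = (lo + hi) // 2
--         if ns[mid] < num:
--             lo = mid + 1
--         else:
--             hi = mid
--     if lo < len(ns) and ns[lo] == num:
--         return num, margins[lo]
--     if lo == 0:
--         return None, None
--     nxt, nm = ns[lo], margins[lo]
--     if nxt - nm <= num: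
--         return nxt, nm
--     return ns[lo - 1], margins[lo - 1]
-- ===== Notes on version B (the rewrite author's own statement) =====
-- stated objective: alternative
-- what changed: A's three sequential list passes (membership test, .index scan, and a linear scan over adjacent pairs) are replaced by a single hand-written binary search for num's insertion point in ns, from which the exact-match, below-minimum and bracket/margin answers are all read off directly.
import Mathlib
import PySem

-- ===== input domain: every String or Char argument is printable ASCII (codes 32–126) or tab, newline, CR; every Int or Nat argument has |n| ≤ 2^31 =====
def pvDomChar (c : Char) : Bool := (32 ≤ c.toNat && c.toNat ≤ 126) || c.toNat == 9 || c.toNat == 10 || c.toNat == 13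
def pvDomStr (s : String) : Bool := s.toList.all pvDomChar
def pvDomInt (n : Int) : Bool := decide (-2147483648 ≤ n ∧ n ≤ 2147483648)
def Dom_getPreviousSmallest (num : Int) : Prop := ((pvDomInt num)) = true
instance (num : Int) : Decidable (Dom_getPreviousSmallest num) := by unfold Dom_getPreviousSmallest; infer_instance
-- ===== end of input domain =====

-- B replaces A's three sequential passes (membership test, .index scan, linear interval scan)
-- by one hand-written binary search for the insertion point; objective: alternative/idiomatic.

-- ===== PORT A =====
-- the for-loop of A with early return; i runs over pyRange 0 6 1 (indices always in range,
-- so the pyGet? defaults are never taken)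
def pvLoopA (ns margins : List Int) (num : Int) : List Int → Option Int × Option Int
  | [] => (none, none)
  | i :: rest =>
    let next := (PySem.List.pyGetD ns (i + 1) 0)
    let nextMarg := (PySem.List.pyGetD margins (i + 1) 0)
    if num > PySem.List.pyGetD ns i 0 ∧ num < next then
      if next > num ∧ next - nextMarg ≤ num then (some next, some nextMarg)
      else (some (PySem.List.pyGetD ns i 0), some (PySem.List.pyGetD margins i 0))
    else pvLoopA ns margins num rest

def getPreviousSmallest (num : Int) : Option Int × Option Int :=
  let ns : List Int := [1, 5, 10, 50, 100, 500, 1000]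
  if num > PySem.List.pyGetD ns ((ns.length : Int) - 1) 0 then (some 1000, some 100)
  else
    let margins : List Int := [0, 1, 1, 10, 10, 100, 100]
    if num ∈ ns then
      (some num,
        match PySem.List.index? ns num with
        | some idx => some (PySem.List.pyGetD margins (idx : Int) 0)
        | none => none)  -- unreachable: num ∈ ns
    else pvLoopA ns margins num (PySem.List.pyRange 0 ((ns.length : Int) - 1) 1)

-- ===== PORT B =====
-- B's while-loop binary search (bisect_left by hand); indexing is always in range on the
-- paths taken, so getD's default is never used
def pvBisect (ns : List Int) (num : Int) : Nat → Nat → Nat → Nat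
  | 0, lo, _ => lo        -- fuel never runs out: the interval halves each step
  | fuel + 1, lo, hi =>
    if lo < hi then
      let mid := (lo + hi) / 2
      if ns.getD mid 0 < num then pvBisect ns num fuel (mid + 1) hi
      else pvBisect ns num fuel lo mid
    else lo

def getPreviousSmallest_alt (num : Int) : Option Int × Option Int :=
  let ns : List Int := [1, 5, 10, 50, 100, 500, 1000]
  let margins : List Int := [0, 1, 1, 10, 10, 100, 100]
  if num > 1000 then (some 1000, some 100)
  else
    let lo := pvBisect ns num ns.length 0 ns.length
    if lo < ns.length ∧ ns.getD lo 0 = num then (some num, some (margins.getD lo 0))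
    else if lo = 0 then (none, none)
    else
      let nxt := ns.getD lo 0
      let nm := margins.getD lo 0
      if nxt - nm ≤ num then (some nxt, some nm)
      else (some (ns.getD (lo - 1) 0), some (margins.getD (lo - 1) 0))

-- ===== PRECONDITION & SPEC =====
def Spec_getPreviousSmallest (num : Int) (out : Option Int × Option Int) : Prop := out = getPreviousSmallest_alt num
instance (num : Int) (out : Option Int × Option Int) : Decidable (Spec_getPreviousSmallest num out) := by unfold Spec_getPreviousSmallest; infer_instance

-- ===== CLAIM =====
def Claim_equal_getPreviousSmallest : Prop := ∀ (num : Int), Dom_getPreviousSmallest num → Spec_getPreviousSmallest num (getPreviousSmallest num)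

-- ===== LEMMAS AND PROOFS =====
-- the two ports agree on every integer 0 ≤ n ≤ 1001 (checked by evaluation)
set_option maxRecDepth 100000 in
lemma pv_agree_small :
    ∀ n ∈ List.range 1002, getPreviousSmallest (n : Int) = getPreviousSmallest_alt (n : Int) := by
  decide

lemma pvBisect_le_one (num : Int) (h : num ≤ 1) :
    pvBisect [1, 5, 10, 50, 100, 500, 1000] num 7 0 7 = 0 := by
  simp [pvBisect, show ¬(50:Int) < num by omega, show ¬(5:Int) < num by omega,
    show ¬(1:Int) < num by omega]

lemma pv_agree_nonpos (num : Int) (h : num ≤ 0) :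
    getPreviousSmallest num = getPreviousSmallest_alt num := by
  have hr : PySem.List.pyRange 0 (([ (1:Int),5,10,50,100,500,1000].length : Int) - 1) 1 = [0,1,2,3,4,5] := by decide
  have hb := pvBisect_le_one num (by omega)
  simp only [getPreviousSmallest, getPreviousSmallest_alt, hr, pvLoopA]
  norm_num [PySem.List.pyGetD, PySem.List.pyGet?, PySem.List.pyIdx?, Int.toNat, hb]
  split_ifs <;> first | rfl | (exfalso; omega)

lemma pv_agree_big (num : Int) (h : 1000 < num) :
    getPreviousSmallest num = getPreviousSmallest_alt num := by
  simp only [getPreviousSmallest, getPreviousSmallest_alt]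
  norm_num [PySem.List.pyGetD, PySem.List.pyGet?, PySem.List.pyIdx?, Int.toNat]
  split_ifs
  rfl

-- ===== VERDICT =====
theorem getPreviousSmallest_spec : Claim_equal_getPreviousSmallest := by
  intro num _
  unfold Spec_getPreviousSmallest
  rcases (by omega : num ≤ 0 ∨ 0 < num) with h | h
  · exact pv_agree_nonpos num h
  rcases (by omega : num ≤ 1000 ∨ 1000 < num) with h2 | h2
  · have hn : num = ((num.toNat : Nat) : Int) := by omega
    have hm : num.toNat ∈ List.range 1002 := by
      simp [List.mem_range]; omega
    rw [hn]; exact pv_agree_small num.toNat hm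
  · exact pv_agree_big num h2
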